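-- pv_equiv track=rewrite | github.com/AhsokaTano26/python_programe_homework | PyPractice_Python编程基础及应用实验教程源代码_答案20220415/PyPractice/T14_FalseCoin/falsecoin.py | find_false_coin_recursive
-- ===== SOURCE A (Python) =====
-- def find_false_coin_recursive(coin_weight_list, start_idx, length):
--        #递归法二分查找较轻的假币
--        #输入为：硬币重量序列， 待判断硬币序列的第一个硬币下标索引， 待判断硬币的总个数
--     if length == 1: #如果待判断硬币为1个
--         return start_idx #则该硬币为假币
--
--     half_length = length // 2  #待判断硬币长度 的一半， 此处用整数，是待判断硬币个数有可能不能平均分成两堆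
--     left_half_weight = sum( coin_weight_list[start_idx : start_idx + half_length])  # 左边堆硬币的总重量,注意下标的范围
--     right_half_weight = sum(coin_weight_list[start_idx + half_length : start_idx + half_length + half_length]) #右边堆硬币的总重量，注意下标的范围
--     if left_half_weight < right_half_weight : #如果左边堆硬币更轻
--         return find_false_coin_recursive(coin_weight_list, start_idx, half_length) #则假币在左边堆硬币，递归调用本函数找出假币
--     if left_half_weight > right_half_weight: #如果右边堆硬币更轻
--         return find_false_coin_recursive(coin_weight_list, start_idx + half_length , half_length) #则假币在右边堆硬币， 递归调用本函数找出假币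
--     if left_half_weight == right_half_weight and half_length * 2 == length: #如果左边堆和右边堆一样轻，且待判断硬币能均分
--         return None #则没有假币
--     else:
--         return start_idx + length - 1 #否则假币为待判断硬币序列的最后一个硬币
-- ===== SOURCE B (Python) =====
-- def find_false_coin_recursive(coin_weight_list, start_idx, length):
--     # iterative binary weighing: a 'weigh' helper returns the comparison sign
--     # of the two half-piles, and a while loop shrinks (start_idx, length)
--     def weigh(s, h):
--         left = sum(coin_weight_list[s : s + h])
--         right = sum(coin_weight_list[s + h : s + 2 * h])
--         return (left > right) - (left < right)
--
--     while length > 1: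
--         half = length // 2
--         c = weigh(start_idx, half)
--         if c == 0:
--             return None if 2 * half == length else start_idx + length - 1
--         if c > 0:
--             start_idx += half
--         length = half
--     return start_idx if length == 1 else None
-- ===== Notes on version B (the rewrite author's own statement) =====
-- stated objective: alternative
-- what changed: Recursion replaced by an iterative while-loop over (start_idx, length) with a separate weigh helper that returns a comparison sign; the equal-piles case is decided first and both unequal branches share one length update.
-- outside the precondition, e.g. on find_false_coin_recursive([], 0, -1): A returns -2, B returns None; on find_false_coin_recursive([1, 2], 0, -1): A returns -3, B returns None; on find_false_coin_recursive([1, 2], 1, -1): A raises RecursionError, B returns None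
import Mathlib
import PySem

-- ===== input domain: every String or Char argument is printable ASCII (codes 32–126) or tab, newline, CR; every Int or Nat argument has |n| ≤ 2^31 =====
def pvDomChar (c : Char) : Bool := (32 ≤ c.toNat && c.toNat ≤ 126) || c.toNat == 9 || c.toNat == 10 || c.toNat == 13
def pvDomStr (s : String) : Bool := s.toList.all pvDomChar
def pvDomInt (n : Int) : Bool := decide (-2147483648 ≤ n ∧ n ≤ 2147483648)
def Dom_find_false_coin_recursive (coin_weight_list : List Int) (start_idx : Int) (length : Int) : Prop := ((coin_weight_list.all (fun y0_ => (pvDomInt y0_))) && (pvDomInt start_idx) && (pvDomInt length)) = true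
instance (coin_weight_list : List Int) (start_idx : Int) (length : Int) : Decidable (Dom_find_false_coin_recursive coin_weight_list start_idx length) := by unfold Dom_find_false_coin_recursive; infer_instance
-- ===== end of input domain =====

-- B replaces A's recursion by an iterative loop over (start_idx, length) with a
-- comparison-sign weigh helper (alternative decomposition; same cost).
-- Both Pythons / ports are pure; no argument is mutated.

-- ===== PORT A =====
-- Literal port of A's recursion; the fuel argument only makes the recursion
-- total in Lean (for length ≥ 0 it is never exhausted, the depth is ≤ length+1).
def pvFindA (coin_weight_list : List Int) : Nat → Int → Int → Option Int
  | 0, _, _ => none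
  | fuel + 1, start_idx, length =>
    if length == 1 then some start_idx
    else
      let half_length := PySem.Int.floordiv length 2
      let left_half_weight := (PySem.List.slice coin_weight_list (some start_idx) (some (start_idx + half_length))).sum
      let right_half_weight := (PySem.List.slice coin_weight_list (some (start_idx + half_length)) (some (start_idx + half_length + half_length))).sum
      if left_half_weight < right_half_weight then
        pvFindA coin_weight_list fuel start_idx half_length
      else if left_half_weight > right_half_weight then
        pvFindA coin_weight_list fuel (start_idx + half_length) half_length
      else if left_half_weight == right_half_weight && half_length * 2 == length then
        none
      else
        some (start_idx + length - 1)

def find_false_coin_recursive (coin_weight_list : List Int) (start_idx : Int) (length : Int) : Option Int :=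
  pvFindA coin_weight_list (length.toNat + 1) start_idx length

-- ===== PORT B =====
-- Source B's weigh helper: comparison sign of the two half-piles.
def pvWeigh (coin_weight_list : List Int) (s h : Int) : Int :=
  let left := (PySem.List.slice coin_weight_list (some s) (some (s + h))).sum
  let right := (PySem.List.slice coin_weight_list (some (s + h)) (some (s + 2 * h))).sum
  (if left > right then (1 : Int) else 0) - (if left < right then (1 : Int) else 0)

-- Source B's while loop, as a fuel-driven tail recursion over the loop state.
def pvLoopB (coin_weight_list : List Int) : Nat → Int → Int → Option Int
  | 0, _, _ => none
  | fuel + 1, start_idx, length =>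
    if length > 1 then
      let half := PySem.Int.floordiv length 2
      let c := pvWeigh coin_weight_list start_idx half
      if c == 0 then
        if 2 * half == length then none else some (start_idx + length - 1)
      else if c > 0 then
        pvLoopB coin_weight_list fuel (start_idx + half) half
      else
        pvLoopB coin_weight_list fuel start_idx half
    else if length == 1 then some start_idx
    else none

def find_false_coin_recursive_alt (coin_weight_list : List Int) (start_idx : Int) (length : Int) : Option Int :=
  pvLoopB coin_weight_list (length.toNat + 1) start_idx length

-- ===== PRECONDITION & SPEC =====
-- length counts coins, so Pre_ restricts to the natural domain length ≥ 0.
-- Outside it A may recurse without bound (e.g. ([1,2], 1, -1)) or return a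
-- meaningless negative index, while B falls through its loop and returns None.
def Pre_find_false_coin_recursive (coin_weight_list : List Int) (start_idx : Int) (length : Int) : Prop := 0 ≤ length
instance (coin_weight_list : List Int) (start_idx : Int) (length : Int) : Decidable (Pre_find_false_coin_recursive coin_weight_list start_idx length) := by unfold Pre_find_false_coin_recursive; infer_instance
def pvWitness_find_false_coin_recursive : List Int × Int × Int := ([1, 1, 1, 2], 0, 4)

def Spec_find_false_coin_recursive (coin_weight_list : List Int) (start_idx : Int) (length : Int) (out : Option Int) : Prop := out = find_false_coin_recursive_alt coin_weight_list start_idx length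
instance (coin_weight_list : List Int) (start_idx : Int) (length : Int) (out : Option Int) : Decidable (Spec_find_false_coin_recursive coin_weight_list start_idx length out) := by unfold Spec_find_false_coin_recursive; infer_instance

-- ===== CLAIM (what is proved, stated in full; the proofs are below) =====
def Claim_equal_find_false_coin_recursive : Prop := ∀ (coin_weight_list : List Int) (start_idx : Int) (length : Int), Dom_find_false_coin_recursive coin_weight_list start_idx length → Pre_find_false_coin_recursive coin_weight_list start_idx length → Spec_find_false_coin_recursive coin_weight_list start_idx length (find_false_coin_recursive coin_weight_list start_idx length)

-- ===== LEMMAS AND PROOFS =====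

lemma pvFindA_eq_pvLoopB (coin_weight_list : List Int) :
    ∀ (fuel : Nat) (start_idx length : Int), 0 ≤ length →
      pvFindA coin_weight_list fuel start_idx length = pvLoopB coin_weight_list fuel start_idx length := by
  intro fuel
  induction fuel with
  | zero => intro s l _; rfl
  | succ n ih =>
    intro s l hl
    by_cases h1 : l = 1
    · subst h1; simp [pvFindA, pvLoopB]
    · by_cases h0 : l = 0
      · subst h0
        simp [pvFindA, pvLoopB, PySem.Int.floordiv]
      · have hl2 : (2 : Int) ≤ l := by omega
        have hhalf : 0 ≤ PySem.Int.floordiv l 2 := by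
          unfold PySem.Int.floordiv
          exact Int.fdiv_nonneg (by omega) (by omega)
        simp only [pvFindA, pvLoopB]
        have hne1 : (l == 1) = false := by simp [h1]
        have hgt1 : l > 1 := by omega
        rw [hne1, if_neg (by simp), if_pos hgt1]
        generalize hgen : PySem.Int.floordiv l 2 = hf at hhalf ⊢
        have h2h : s + hf + hf = s + 2 * hf := by ring
        rw [h2h]
        rcases lt_trichotomy
            ((PySem.List.slice coin_weight_list (some s) (some (s + hf))).sum)
            ((PySem.List.slice coin_weight_list (some (s + hf)) (some (s + 2 * hf))).sum) with hc | hc | hc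
        · -- left pile lighter: both sides recurse with (s, half)
          have hw : pvWeigh coin_weight_list s hf = -1 := by
            simp [pvWeigh, hc, not_lt.mpr (le_of_lt hc)]
          simp only [hw, if_pos hc]
          norm_num
          exact ih s hf hhalf
        · -- piles balance: both sides return the tie result
          have hw : pvWeigh coin_weight_list s hf = 0 := by
            simp [pvWeigh, hc]
          simp only [hw, hc, lt_irrefl]
          simp [mul_comm]
        · -- right pile lighter: both sides recurse with (s + half, half)
          have hw : pvWeigh coin_weight_list s hf = 1 := by
            simp [pvWeigh, hc, not_lt.mpr (le_of_lt hc)]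
          simp only [hw, if_neg (not_lt.mpr (le_of_lt hc)), gt_iff_lt, if_pos hc]
          norm_num
          exact ih (s + hf) hf hhalf

-- ===== VERDICT (by name: the statement is the Claim_ definition above) =====
theorem find_false_coin_recursive_spec : Claim_equal_find_false_coin_recursive := by
  intro lst s l _ hpre
  unfold Spec_find_false_coin_recursive find_false_coin_recursive find_false_coin_recursive_alt
  exact pvFindA_eq_pvLoopB lst (l.toNat + 1) s l hpre
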